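-- pv_equiv track=rewrite | github.com/jay1059/vicbip | vicbip/packages/pipeline/ingest/freyssinet_projects.py | is_victorian
-- ===== SOURCE A (Python) =====
-- def is_victorian(project: dict) -> bool:
--     text = (
--         project.get('location', '') + ' ' + project.get('full_text', '')
--     ).lower()
--     vic_markers = [
--         'victoria', 'melbourne', 'geelong', 'ballarat', 'bendigo',
--         'vic,', ' vic ', 'vicroads', 'v/line', 'victrack',
--     ]
--     return any(m in text for m in vic_markers)
-- ===== SOURCE B (Python) =====
-- VIC_MARKERS = (
--     'victoria', 'melbourne', 'geelong', 'ballarat', 'bendigo',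
--     'vic,', ' vic ', 'vicroads', 'v/line', 'victrack',
-- )
--
-- def is_victorian(project: dict) -> bool:
--     loc = project.get('location', '')
--     full = project.get('full_text', '')
--     text = (loc + ' ' + full).lower()
--     # single left-to-right position scan: at each position test whether some marker starts there
--     for i in range(len(text) + 1):
--         tail = text[i:]
--         if any(tail.startswith(m) for m in VIC_MARKERS):
--             return True
--     return False
-- ===== Notes on version B (the rewrite author's own statement) =====
-- stated objective: alternative
-- what changed: Replaces ten independent substring searches ('m in text' per marker) with one left-to-right scan over text positions that tests at each position whether any marker starts there.
import Mathlib
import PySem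

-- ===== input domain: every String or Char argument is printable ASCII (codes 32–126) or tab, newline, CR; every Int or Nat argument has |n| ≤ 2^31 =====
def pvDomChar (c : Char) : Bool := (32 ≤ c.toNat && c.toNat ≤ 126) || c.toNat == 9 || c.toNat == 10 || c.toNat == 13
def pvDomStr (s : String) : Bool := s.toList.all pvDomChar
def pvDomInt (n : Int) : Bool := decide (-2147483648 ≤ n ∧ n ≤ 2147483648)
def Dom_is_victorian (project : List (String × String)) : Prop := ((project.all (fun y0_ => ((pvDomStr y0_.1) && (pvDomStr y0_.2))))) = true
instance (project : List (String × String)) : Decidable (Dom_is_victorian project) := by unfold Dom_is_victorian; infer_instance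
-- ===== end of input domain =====

-- B replaces ten independent substring searches with one left-to-right position scan; alternative structure, same results.
-- ===== PORT A =====
def is_victorian (project : List (String × String)) : Bool :=
  let text := PySem.Str.lower
    (PySem.Dict.getD (PySem.Dict.ofList project) "location" "" ++ " " ++
     PySem.Dict.getD (PySem.Dict.ofList project) "full_text" "")
  let vic_markers : List String :=
    ["victoria", "melbourne", "geelong", "ballarat", "bendigo",
     "vic,", " vic ", "vicroads", "v/line", "victrack"]
  vic_markers.any (fun m => PySem.Str.isIn m text)

-- ===== PORT B =====
def VIC_MARKERS : List String :=
  ["victoria", "melbourne", "geelong", "ballarat", "bendigo",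
   "vic,", " vic ", "vicroads", "v/line", "victrack"]

-- the for-loop with an early 'return True' and final 'return False' is List.any over the positions
def is_victorian_alt (project : List (String × String)) : Bool :=
  let loc := PySem.Dict.getD (PySem.Dict.ofList project) "location" ""
  let full := PySem.Dict.getD (PySem.Dict.ofList project) "full_text" ""
  let text := PySem.Str.lower (loc ++ " " ++ full)
  (List.range (text.toList.length + 1)).any (fun i =>
    let tail := PySem.Chars.slice text.toList (some (i : Int)) none
    VIC_MARKERS.any (fun m => PySem.Chars.startswith tail m.toList))

-- ===== PRECONDITION & SPEC =====
def Spec_is_victorian (project : List (String × String)) (out : Bool) : Prop := out = is_victorian_alt project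
instance (project : List (String × String)) (out : Bool) : Decidable (Spec_is_victorian project out) := by unfold Spec_is_victorian; infer_instance

-- ===== CLAIM (what is proved, stated in full; the proofs are below) =====
def Claim_equal_is_victorian : Prop := ∀ (project : List (String × String)), Dom_is_victorian project → Spec_is_victorian project (is_victorian project)

-- ===== LEMMAS AND PROOFS =====

-- swapping the order of two nested any-scans
lemma any_swap {α β : Type} (xs : List α) (ys : List β) (p : α → β → Bool) :
    xs.any (fun x => ys.any (fun y => p x y)) = ys.any (fun y => xs.any (fun x => p x y)) := by
  rw [Bool.eq_iff_iff]
  simp only [List.any_eq_true]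
  tauto

-- a bounded position scan finds a marker iff the substring search does
lemma scan_eq_isIn (t : List Char) (m : List Char) :
    ((List.range (t.length + 1)).any (fun i => PySem.Chars.startswith (t.drop i) m))
      = PySem.Chars.isIn m t := by
  rcases h : PySem.Chars.isIn m t with _ | _
  · rw [List.any_eq_false]
    intro i _
    simp only [PySem.Chars.startswith_iff]
    intro hp
    have : ∃ j, m <+: t.drop j := ⟨i, hp⟩
    rw [PySem.Chars.exists_prefix_drop_iff_isIn] at this
    simp [h] at this
  · rw [List.any_eq_true]
    obtain ⟨j, hj⟩ := (PySem.Chars.exists_prefix_drop_iff_isIn (sub := m) (s := t)).mpr h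
    by_cases hle : j ≤ t.length
    · exact ⟨j, List.mem_range.mpr (by omega), (PySem.Chars.startswith_iff _ _).mpr hj⟩
    · refine ⟨t.length, List.mem_range.mpr (by omega), (PySem.Chars.startswith_iff _ _).mpr ?_⟩
      rw [List.drop_eq_nil_of_le (by omega)] at hj
      rw [List.drop_length]
      exact hj

-- ===== VERDICT (by name: the statement is the Claim_ definition above) =====
theorem is_victorian_spec : Claim_equal_is_victorian := by
  intro project _
  unfold Spec_is_victorian is_victorian is_victorian_alt VIC_MARKERS
  simp only [PySem.Chars.slice_eq_listSlice, PySem.List.slice_from_natCast]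
  rw [any_swap]
  simp only [scan_eq_isIn, PySem.Str.isIn_eq]
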